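-- pv_equiv track=rewrite | github.com/la200176/aoc2022 | 9/knots.py | pull
-- ===== SOURCE A (Python) =====
-- def pull(head_pos, tail_pos):
--     (dx, dy) = tuple(head-tail for (head, tail) in zip(head_pos, tail_pos))
--     r2 = dx**2 + dy**2
--     if r2 == 8:
--         return (dx // abs(dx), dy // abs(dy))
--     if r2 == 5:
--         return (dx // abs(dx), dy // abs(dy))
--     if r2 == 4:
--         return (dx // abs(dx) if abs(dx) > 0 else 0, dy // abs(dy) if abs(dy) > 0 else 0)
--     if r2 == 2:
--         return (0, 0)
--     if r2 == 1:
--         return (0, 0)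
--     if r2 == 0:
--         return (0, 0)
--     raise ValueError(f"impossible: head {head_pos}, tail {tail_pos}")
-- ===== SOURCE B (Python) =====
-- _STEP = {
--     (-2, -2): (-1, -1), (-2, -1): (-1, -1), (-2, 0): (-1, 0), (-2, 1): (-1, 1), (-2, 2): (-1, 1),
--     (-1, -2): (-1, -1), (-1, -1): (0, 0),   (-1, 0): (0, 0),  (-1, 1): (0, 0),  (-1, 2): (-1, 1),
--     (0, -2):  (0, -1),  (0, -1):  (0, 0),   (0, 0):  (0, 0),  (0, 1):  (0, 0),  (0, 2):  (0, 1),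
--     (1, -2):  (1, -1),  (1, -1):  (0, 0),   (1, 0):  (0, 0),  (1, 1):  (0, 0),  (1, 2):  (1, 1),
--     (2, -2):  (1, -1),  (2, -1):  (1, -1),  (2, 0):  (1, 0),  (2, 1):  (1, 1),  (2, 2):  (1, 1),
-- }
--
-- def pull(head_pos, tail_pos):
--     delta = tuple(head - tail for (head, tail) in zip(head_pos, tail_pos))
--     try:
--         return _STEP[delta]
--     except KeyError:
--         raise ValueError(f"impossible: head {head_pos}, tail {tail_pos}")
-- ===== Notes on version B (the rewrite author's own statement) =====
-- stated objective: alternative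
-- what changed: Replaces the six-way arithmetic dispatch on the squared distance r2 (with floor-division by abs for the sign) by a single lookup in a precomputed 25-entry table keyed by the offset vector (dx,dy); no arithmetic classification is done at call time and KeyError on an out-of-range offset becomes the ValueError.
import Mathlib
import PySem

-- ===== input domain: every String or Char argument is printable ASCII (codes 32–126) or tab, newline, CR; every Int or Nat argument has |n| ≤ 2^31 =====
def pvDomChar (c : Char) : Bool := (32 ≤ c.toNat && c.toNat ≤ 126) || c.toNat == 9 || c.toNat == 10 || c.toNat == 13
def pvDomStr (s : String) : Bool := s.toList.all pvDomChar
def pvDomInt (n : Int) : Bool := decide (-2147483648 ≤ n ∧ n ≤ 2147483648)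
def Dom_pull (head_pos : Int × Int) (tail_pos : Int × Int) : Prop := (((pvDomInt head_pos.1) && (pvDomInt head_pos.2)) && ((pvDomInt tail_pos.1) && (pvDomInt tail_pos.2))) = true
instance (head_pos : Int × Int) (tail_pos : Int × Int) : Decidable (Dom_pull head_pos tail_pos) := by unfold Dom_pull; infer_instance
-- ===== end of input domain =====

-- B replaces A's six-way r2-squared dispatch by one lookup in a precomputed 25-entry table
-- keyed by the offset vector (a different, table-driven decomposition, not faster).

-- ===== PORT A =====
-- pull, transliterated: r2-squared six-way dispatch; the raise branch is outside Pre_pull.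
def pull (head_pos : Int × Int) (tail_pos : Int × Int) : Int × Int :=
  let dx : Int := head_pos.1 - tail_pos.1
  let dy : Int := head_pos.2 - tail_pos.2
  let r2 : Int := dx ^ 2 + dy ^ 2
  if r2 = 8 then (PySem.Int.floordiv dx |dx|, PySem.Int.floordiv dy |dy|)
  else if r2 = 5 then (PySem.Int.floordiv dx |dx|, PySem.Int.floordiv dy |dy|)
  else if r2 = 4 then
    ((if |dx| > 0 then PySem.Int.floordiv dx |dx| else 0),
     (if |dy| > 0 then PySem.Int.floordiv dy |dy| else 0))
  else if r2 = 2 then (0, 0)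
  else if r2 = 1 then (0, 0)
  else if r2 = 0 then (0, 0)
  else (0, 0)  -- Python raises ValueError here; excluded by Pre_pull

-- ===== PORT B =====
-- B's module-level precomputed table _STEP (dict in insertion order).
def stepTable : PySem.Dict (Int × Int) (Int × Int) := PySem.Dict.mk
  [((-2, -2), (-1, -1)), ((-2, -1), (-1, -1)), ((-2, 0), (-1, 0)), ((-2, 1), (-1, 1)), ((-2, 2), (-1, 1)),
   ((-1, -2), (-1, -1)), ((-1, -1), (0, 0)),   ((-1, 0), (0, 0)),  ((-1, 1), (0, 0)),  ((-1, 2), (-1, 1)),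
   ((0, -2),  (0, -1)),  ((0, -1),  (0, 0)),   ((0, 0),  (0, 0)),  ((0, 1),  (0, 0)),  ((0, 2),  (0, 1)),
   ((1, -2),  (1, -1)),  ((1, -1),  (0, 0)),   ((1, 0),  (0, 0)),  ((1, 1),  (0, 0)),  ((1, 2),  (1, 1)),
   ((2, -2),  (1, -1)),  ((2, -1),  (1, -1)),  ((2, 0),  (1, 0)),  ((2, 1),  (1, 1)),  ((2, 2),  (1, 1))]

-- B: one table lookup keyed by the offset vector; KeyError → ValueError is outside Pre_pull.
def pull_alt (head_pos : Int × Int) (tail_pos : Int × Int) : Int × Int :=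
  let delta : Int × Int := (head_pos.1 - tail_pos.1, head_pos.2 - tail_pos.2)
  match PySem.Dict.get? stepTable delta with
  | some v => v
  | none => (0, 0)  -- Python raises ValueError here; excluded by Pre_pull

-- ===== PRECONDITION & SPEC =====
-- Pre_pull: exactly the inputs where A returns; when |dx| > 2 or |dy| > 2 both A (r2 not in
-- {0,1,2,4,5,8}) and B (KeyError) raise ValueError.
def Pre_pull (head_pos : Int × Int) (tail_pos : Int × Int) : Prop :=
  |head_pos.1 - tail_pos.1| ≤ 2 ∧ |head_pos.2 - tail_pos.2| ≤ 2
instance (head_pos : Int × Int) (tail_pos : Int × Int) : Decidable (Pre_pull head_pos tail_pos) := by unfold Pre_pull; infer_instance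
def pvWitness_pull : (Int × Int) × (Int × Int) := ((3, 1), (1, 0))
def Spec_pull (head_pos : Int × Int) (tail_pos : Int × Int) (out : Int × Int) : Prop := out = pull_alt head_pos tail_pos
instance (head_pos : Int × Int) (tail_pos : Int × Int) (out : Int × Int) : Decidable (Spec_pull head_pos tail_pos out) := by unfold Spec_pull; infer_instance

-- ===== CLAIM (what is proved, stated in full; the proofs are below) =====
def Claim_equal_pull : Prop := ∀ (head_pos : Int × Int) (tail_pos : Int × Int), Dom_pull head_pos tail_pos → Pre_pull head_pos tail_pos → Spec_pull head_pos tail_pos (pull head_pos tail_pos)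

-- ===== LEMMAS AND PROOFS =====
theorem pull_core (dx dy : Int) (hx : |dx| ≤ 2) (hy : |dy| ≤ 2) :
    pull (dx, dy) (0, 0) = pull_alt (dx, dy) (0, 0) := by
  have hx1 := abs_le.mp hx
  have hy1 := abs_le.mp hy
  obtain ⟨hx2, hx3⟩ := hx1
  obtain ⟨hy2, hy3⟩ := hy1
  interval_cases dx <;> interval_cases dy <;> decide

theorem pull_shift (head_pos tail_pos : Int × Int) :
    pull head_pos tail_pos = pull (head_pos.1 - tail_pos.1, head_pos.2 - tail_pos.2) (0, 0) ∧
    pull_alt head_pos tail_pos = pull_alt (head_pos.1 - tail_pos.1, head_pos.2 - tail_pos.2) (0, 0) := by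
  constructor <;> simp [pull, pull_alt]

-- ===== VERDICT (by name: the statement is the Claim_ definition above) =====
theorem pull_spec : Claim_equal_pull := by
  intro head_pos tail_pos _ hpre
  obtain ⟨hx, hy⟩ := hpre
  unfold Spec_pull
  obtain ⟨ha, hb⟩ := pull_shift head_pos tail_pos
  rw [ha, hb]
  exact pull_core _ _ hx hy
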